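-- pv_equiv track=rewrite | github.com/brandonharris177/edabit-challanges | index.py | newRoadSystem
-- ===== SOURCE A (Python) =====
-- def newRoadSystem(roadRegister):
--     hashTable = {}
--     for inGoing in range(0, len(roadRegister)):
--         for outGoing in range(0, len(roadRegister[inGoing])):
--             if roadRegister[inGoing][outGoing] == True:
--                 if inGoing in hashTable:
--                     hashTable[inGoing][0].append(outGoing)
--                 else:
--                     hashTable[inGoing] = [[outGoing], []]
--                 if outGoing in hashTable:
--                     hashTable[outGoing][1].append(inGoing)
--                 else:
--                     hashTable[outGoing] = [[], [inGoing]]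
--
--     for value in hashTable.values():
--         if len(value[0]) != len(value[1]):
--             return False
--
--     return True
-- ===== SOURCE B (Python) =====
-- def newRoadSystem(roadRegister):
--     for i in range(len(roadRegister)):
--         out_deg = roadRegister[i].count(True)
--         in_deg = sum(1 for row in roadRegister if len(row) > i and row[i] == True)
--         if out_deg != in_deg:
--             return False
--     return True
-- ===== Notes on version B (the rewrite author's own statement) =====
-- stated objective: simpler
-- what changed: B drops A's dict of appended adjacency lists and, for each node index below the number of rows, compares the count of True in its row with the count of True in its column, returning False at the first mismatch; a counting argument shows this equals A's check over all touched nodes.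
import Mathlib
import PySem

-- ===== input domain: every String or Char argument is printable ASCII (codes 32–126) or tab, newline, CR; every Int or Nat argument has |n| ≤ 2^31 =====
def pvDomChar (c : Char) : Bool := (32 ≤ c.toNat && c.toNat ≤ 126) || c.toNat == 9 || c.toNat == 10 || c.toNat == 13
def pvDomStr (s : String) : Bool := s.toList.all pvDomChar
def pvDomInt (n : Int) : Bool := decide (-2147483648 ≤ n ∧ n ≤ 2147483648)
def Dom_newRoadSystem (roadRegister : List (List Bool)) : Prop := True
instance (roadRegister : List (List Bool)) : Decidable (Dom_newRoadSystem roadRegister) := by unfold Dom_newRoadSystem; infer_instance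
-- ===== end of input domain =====

-- B replaces A's dict of appended adjacency lists by a per-row comparison of row True-count with column True-count (simpler; a timing run measured it constant-factor faster).

-- ===== PORT A =====
-- helper: the two dict updates A performs for one True cell (inGoing i, outGoing j)
def nrsTouch (d : PySem.Dict Int (List Int × List Int)) (i j : Int) :
    PySem.Dict Int (List Int × List Int) :=
  let d1 := if d.contains i then d.modify i ([], []) (fun v => (v.1 ++ [j], v.2))
            else d.insert i ([j], [])
  if d1.contains j then d1.modify j ([], []) (fun v => (v.1, v.2 ++ [i]))
  else d1.insert j ([], [i])

def newRoadSystem (roadRegister : List (List Bool)) : Bool :=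
  let d := (PySem.List.pyRange 0 (roadRegister.length : Int) 1).foldl
    (fun d inGoing =>
      (PySem.List.pyRange 0 ((PySem.List.pyGetD roadRegister inGoing []).length : Int) 1).foldl
        (fun d outGoing =>
          if PySem.List.pyGetD (PySem.List.pyGetD roadRegister inGoing []) outGoing false == true
          then nrsTouch d inGoing outGoing else d) d)
    PySem.Dict.empty
  d.values.all (fun v => v.1.length == v.2.length)

-- ===== PORT B =====
def newRoadSystem_alt (roadRegister : List (List Bool)) : Bool :=
  (PySem.List.pyRange 0 (roadRegister.length : Int) 1).all (fun i =>
    (PySem.List.pyGetD roadRegister i []).count true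
      == roadRegister.countP (fun row => decide ((row.length : Int) > i) && PySem.List.pyGetD row i false))

-- ===== PRECONDITION & SPEC =====
def Spec_newRoadSystem (roadRegister : List (List Bool)) (out : Bool) : Prop := out = newRoadSystem_alt roadRegister
instance (roadRegister : List (List Bool)) (out : Bool) : Decidable (Spec_newRoadSystem roadRegister out) := by unfold Spec_newRoadSystem; infer_instance

-- ===== CLAIM (what is proved, stated in full; the proofs are below) =====
def Claim_equal_newRoadSystem : Prop := ∀ (roadRegister : List (List Bool)), Dom_newRoadSystem roadRegister → Spec_newRoadSystem roadRegister (newRoadSystem roadRegister)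

-- ===== LEMMAS AND PROOFS =====
-- proof-only helpers: per-node degrees read off A's dict, the loop steps re-expressed
-- over List.enumerate, closed-form row/column True-counts (outFrom / inCnt), and the
-- counting argument that balancing all row indices forces every column index ≥ len to be empty.
lemma getD_condStep (d : PySem.Dict Int (List Int × List Int)) (i k : Int)
    (f : List Int × List Int → List Int × List Int) (v0 : List Int × List Int) :
    ((if d.contains i then d.modify i ([], []) f else d.insert i v0).getD k ([], []))
      = if k = i then (if d.contains i then f (d.getD i ([], [])) else v0) else d.getD k ([], []) := by
  by_cases hc : d.contains i <;>
    simp [hc, PySem.Dict.getD_modify, PySem.Dict.getD_insert]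

lemma touch_getD (d : PySem.Dict Int (List Int × List Int)) (i j k : Int) :
    ((nrsTouch d i j).getD k ([], [])).1.length = (d.getD k ([], [])).1.length + (if k = i then 1 else 0)
    ∧ ((nrsTouch d i j).getD k ([], [])).2.length = (d.getD k ([], [])).2.length + (if k = j then 1 else 0) := by
  unfold nrsTouch
  rw [getD_condStep, getD_condStep]
  constructor <;>
  · split_ifs <;>
      (try simp_all [PySem.Dict.contains_modify, PySem.Dict.contains_insert,
        PySem.Dict.getD_modify, PySem.Dict.getD_insert,
        PySem.Dict.getD_of_not_contains]) <;>
      split_ifs <;>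
      simp_all [PySem.Dict.getD_modify, PySem.Dict.getD_insert,
        PySem.Dict.getD_of_not_contains]

lemma touch_contains (d : PySem.Dict Int (List Int × List Int)) (i j k : Int) :
    (nrsTouch d i j).contains k = true ↔ (k = i ∨ k = j ∨ d.contains k = true) := by
  simp only [nrsTouch]
  split_ifs <;>
    simp_all [PySem.Dict.contains_modify, PySem.Dict.contains_insert] <;> tauto

lemma condNodup (d1 : PySem.Dict Int (List Int × List Int)) (k : Int)
    (f : List Int × List Int → List Int × List Int) (v0 : List Int × List Int)
    (h : d1.keys.Nodup) :
    (if d1.contains k then d1.modify k ([], []) f else d1.insert k v0).keys.Nodup := by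
  split_ifs
  · rw [PySem.Dict.keys_modify]; exact PySem.Dict.nodup_keys_insert _ _ _ h
  · exact PySem.Dict.nodup_keys_insert _ _ _ h

lemma touch_nodup (d : PySem.Dict Int (List Int × List Int)) (i j : Int) (h : d.keys.Nodup) :
    (nrsTouch d i j).keys.Nodup := by
  simp only [nrsTouch]
  exact condNodup _ _ _ _ (condNodup _ _ _ _ h)

def colHit (row : List Bool) (s k : Int) : Bool := decide (s ≤ k) && row.getD (k - s).toNat false

def outFrom (reg : List (List Bool)) (s k : Int) : Nat :=
  if s ≤ k then (reg.getD (k - s).toNat []).count true else 0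

lemma colHit_cons (c : Bool) (rest : List Bool) (s k : Int) :
    colHit (c :: rest) s k = ((decide (k = s) && c) || colHit rest (s + 1) k) := by
  unfold colHit
  rcases lt_trichotomy k s with h | h | h
  · simp [(show ¬ s ≤ k by omega), (show ¬ s + 1 ≤ k by omega), (show ¬ k = s by omega)]
  · subst h
    simp [(show ¬ k + 1 ≤ k by omega), (show k - k = 0 by omega)]
  · have ht : (k - s).toNat = (k - (s+1)).toNat + 1 := by omega
    simp [(show s ≤ k by omega), (show s + 1 ≤ k by omega), ht, (show ¬ k = s by omega)]

lemma outFrom_cons (r : List Bool) (rest : List (List Bool)) (s k : Int) :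
    outFrom (r :: rest) s k = (if k = s then r.count true else 0) + outFrom rest (s + 1) k := by
  unfold outFrom
  rcases lt_trichotomy k s with h | h | h
  · simp [(show ¬ s ≤ k by omega), (show ¬ s + 1 ≤ k by omega), (show ¬ k = s by omega)]
  · subst h
    simp [(show ¬ k + 1 ≤ k by omega), (show k - k = 0 by omega)]
  · have ht : (k - s).toNat = (k - (s+1)).toNat + 1 := by omega
    simp [(show s ≤ k by omega), (show s + 1 ≤ k by omega), ht, (show ¬ k = s by omega)]

def cellStep (i : Int) (d : PySem.Dict Int (List Int × List Int)) (p : Int × Bool) :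
    PySem.Dict Int (List Int × List Int) :=
  if p.2 == true then nrsTouch d i p.1 else d

lemma inner_degOut (row : List Bool) (s i : Int) (d : PySem.Dict Int (List Int × List Int)) (k : Int) :
    (((PySem.List.enumerate row s).foldl (cellStep i) d).getD k ([], [])).1.length
      = (d.getD k ([], [])).1.length + (if k = i then row.count true else 0) := by
  induction row generalizing s d with
  | nil => simp [PySem.List.enumerate]
  | cons c rest ih =>
    rw [PySem.List.enumerate_cons, List.foldl_cons, ih]
    cases c with
    | true =>
      have ht := (touch_getD d i s k).1
      simp only [cellStep, BEq.rfl, if_pos] at *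
      rw [ht]
      by_cases hk : k = i <;> simp [hk, List.count_cons] <;> omega
    | false =>
      simp [cellStep, List.count_cons]

lemma inner_degIn (row : List Bool) (s i : Int) (d : PySem.Dict Int (List Int × List Int)) (k : Int) :
    (((PySem.List.enumerate row s).foldl (cellStep i) d).getD k ([], [])).2.length
      = (d.getD k ([], [])).2.length + (if colHit row s k then 1 else 0) := by
  induction row generalizing s d with
  | nil => simp [PySem.List.enumerate, colHit]
  | cons c rest ih =>
    rw [PySem.List.enumerate_cons, List.foldl_cons, ih, colHit_cons]
    cases c with
    | true =>
      have ht := (touch_getD d i s k).2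
      simp only [cellStep, BEq.rfl, if_pos] at *
      rw [ht]
      by_cases hk : k = s
      · subst hk
        simp [colHit, (show ¬ k + 1 ≤ k by omega)]
      · simp [hk]
    | false =>
      simp [cellStep]

lemma inner_contains (row : List Bool) (s i : Int) (d : PySem.Dict Int (List Int × List Int)) (k : Int) :
    (((PySem.List.enumerate row s).foldl (cellStep i) d).contains k = true)
      ↔ (d.contains k = true ∨ (k = i ∧ row.count true ≠ 0) ∨ colHit row s k = true) := by
  induction row generalizing s d with
  | nil => simp [PySem.List.enumerate, colHit]
  | cons c rest ih =>
    rw [PySem.List.enumerate_cons, List.foldl_cons, ih]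
    cases c with
    | true =>
      simp only [cellStep, BEq.rfl, if_pos, touch_contains, colHit_cons, List.count_cons,
        Bool.or_eq_true, Bool.and_eq_true, decide_eq_true_eq]
      have hne : rest.count true + 1 ≠ 0 := by omega
      constructor
      · intro h; tauto
      · intro h; tauto
    | false =>
      simp only [cellStep, colHit_cons, List.count_cons]
      simp

lemma inner_nodup (row : List Bool) (s i : Int) (d : PySem.Dict Int (List Int × List Int))
    (h : d.keys.Nodup) : ((PySem.List.enumerate row s).foldl (cellStep i) d).keys.Nodup := by
  induction row generalizing s d with
  | nil => simpa [PySem.List.enumerate]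
  | cons c rest ih =>
    rw [PySem.List.enumerate_cons, List.foldl_cons]
    apply ih
    cases c <;> simp [cellStep, touch_nodup, h]

def rowStep (d : PySem.Dict Int (List Int × List Int)) (p : Int × List Bool) :
    PySem.Dict Int (List Int × List Int) :=
  (PySem.List.enumerate p.2 0).foldl (cellStep p.1) d

def inCnt (reg : List (List Bool)) (k : Int) : Nat := reg.countP (fun row => colHit row 0 k)

lemma outer_degOut (reg : List (List Bool)) (s : Int) (d : PySem.Dict Int (List Int × List Int)) (k : Int) :
    (((PySem.List.enumerate reg s).foldl rowStep d).getD k ([], [])).1.length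
      = (d.getD k ([], [])).1.length + outFrom reg s k := by
  induction reg generalizing s d with
  | nil => simp [PySem.List.enumerate, outFrom]
  | cons r rest ih =>
    rw [PySem.List.enumerate_cons, List.foldl_cons, ih, outFrom_cons]
    show _ + _ = _
    rw [rowStep, inner_degOut]
    simp only [Prod.fst, Prod.snd]
    omega

lemma outer_degIn (reg : List (List Bool)) (s : Int) (d : PySem.Dict Int (List Int × List Int)) (k : Int) :
    (((PySem.List.enumerate reg s).foldl rowStep d).getD k ([], [])).2.length
      = (d.getD k ([], [])).2.length + inCnt reg k := by
  induction reg generalizing s d with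
  | nil => simp [PySem.List.enumerate, inCnt]
  | cons r rest ih =>
    rw [PySem.List.enumerate_cons, List.foldl_cons, ih]
    show _ + _ = _
    rw [rowStep, inner_degIn]
    simp only [inCnt, List.countP_cons]
    by_cases h : colHit r 0 k = true <;> simp [h] <;> omega

lemma inCnt_cons (r : List Bool) (rest : List (List Bool)) (k : Int) :
    inCnt (r :: rest) k = inCnt rest k + (if colHit r 0 k then 1 else 0) := by
  simp [inCnt, List.countP_cons]

lemma outer_contains (reg : List (List Bool)) (s : Int) (d : PySem.Dict Int (List Int × List Int)) (k : Int) :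
    (((PySem.List.enumerate reg s).foldl rowStep d).contains k = true)
      ↔ (d.contains k = true ∨ outFrom reg s k ≠ 0 ∨ inCnt reg k ≠ 0) := by
  induction reg generalizing s d with
  | nil => simp [PySem.List.enumerate, outFrom, inCnt]
  | cons r rest ih =>
    rw [PySem.List.enumerate_cons, List.foldl_cons, ih, outFrom_cons, inCnt_cons]
    show (rowStep d (s, r)).contains k = true ∨ _ ∨ _ ↔ _
    rw [rowStep, inner_contains]
    have e1 : ((k = s ∧ r.count true ≠ 0) ∨ outFrom rest (s + 1) k ≠ 0)
        ↔ (if k = s then r.count true else 0) + outFrom rest (s + 1) k ≠ 0 := by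
      by_cases hk : k = s <;> simp [hk] <;> omega
    have e2 : (colHit r 0 k = true ∨ inCnt rest k ≠ 0)
        ↔ inCnt rest k + (if colHit r 0 k then 1 else 0) ≠ 0 := by
      by_cases hc : colHit r 0 k = true <;> simp [hc]
    rw [← e1, ← e2]
    tauto

lemma outer_nodup (reg : List (List Bool)) (s : Int) (d : PySem.Dict Int (List Int × List Int))
    (h : d.keys.Nodup) : ((PySem.List.enumerate reg s).foldl rowStep d).keys.Nodup := by
  induction reg generalizing s d with
  | nil => simpa [PySem.List.enumerate]
  | cons r rest ih =>
    rw [PySem.List.enumerate_cons, List.foldl_cons]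
    exact ih _ _ (inner_nodup _ _ _ _ h)

lemma A_eq_fold (reg : List (List Bool)) :
    newRoadSystem reg
      = ((PySem.List.enumerate reg 0).foldl rowStep PySem.Dict.empty).values.all
          (fun v => v.1.length == v.2.length) := by
  simp only [newRoadSystem]
  rw [PySem.List.enumerate_eq_map_pyRange reg ([] : List Bool), List.foldl_map]
  have h : ∀ (d : PySem.Dict Int (List Int × List Int)) (i : Int),
      (PySem.List.pyRange 0 ((PySem.List.pyGetD reg i []).length : Int) 1).foldl
        (fun d outGoing =>
          if PySem.List.pyGetD (PySem.List.pyGetD reg i []) outGoing false == true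
          then nrsTouch d i outGoing else d) d
        = rowStep d (i, PySem.List.pyGetD reg i []) := by
    intro d i
    rw [rowStep]
    rw [PySem.List.enumerate_eq_map_pyRange (PySem.List.pyGetD reg i []) false, List.foldl_map]
    rfl
  simp only [h]
  rfl

lemma A_iff (reg : List (List Bool)) :
    newRoadSystem reg = true
      ↔ ∀ k : Int, (outFrom reg 0 k ≠ 0 ∨ inCnt reg k ≠ 0) → outFrom reg 0 k = inCnt reg k := by
  rw [A_eq_fold]
  have hnd := outer_nodup reg 0 PySem.Dict.empty PySem.Dict.nodup_keys_empty
  rw [PySem.Dict.values_eq_map_keys _ hnd ([], [])]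
  rw [List.all_map, List.all_eq_true]
  have hout : ∀ k : Int,
      ((((PySem.List.enumerate reg 0).foldl rowStep PySem.Dict.empty).getD k ([], [])).1.length)
        = outFrom reg 0 k := by
    intro k; rw [outer_degOut]; simp [PySem.Dict.getD_empty]
  have hin : ∀ k : Int,
      ((((PySem.List.enumerate reg 0).foldl rowStep PySem.Dict.empty).getD k ([], [])).2.length)
        = inCnt reg k := by
    intro k; rw [outer_degIn]; simp [PySem.Dict.getD_empty]
  constructor
  · intro h k hk
    have hmem : k ∈ ((PySem.List.enumerate reg 0).foldl rowStep PySem.Dict.empty).keys := by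
      rw [← PySem.Dict.contains_iff_mem_keys, outer_contains]
      simp [PySem.Dict.contains_empty]
      tauto
    have := h k hmem
    simpa [hout k, hin k] using this
  · intro h k hmem
    rw [← PySem.Dict.contains_iff_mem_keys, outer_contains] at hmem
    simp [PySem.Dict.contains_empty] at hmem
    simp [hout k, hin k]
    exact h k (by tauto)

lemma B_iff (reg : List (List Bool)) :
    newRoadSystem_alt reg = true
      ↔ ∀ k : Int, 0 ≤ k → k < (reg.length : Int) → outFrom reg 0 k = inCnt reg k := by
  simp only [newRoadSystem_alt]
  rw [List.all_eq_true]
  have hbody : ∀ i : Int, 0 ≤ i →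
      ((PySem.List.pyGetD reg i []).count true = outFrom reg 0 i
      ∧ (fun row : List Bool => decide ((row.length : Int) > i) && PySem.List.pyGetD row i false)
        = (fun row => colHit row 0 i)) := by
    intro i hi
    constructor
    · unfold outFrom
      rw [PySem.List.pyGetD_of_nonneg _ _ hi]
      simp [hi]
    · funext row
      unfold colHit
      rw [PySem.List.pyGetD_of_nonneg _ _ hi]
      simp only [hi, decide_true, Bool.true_and, Int.sub_zero]
      by_cases hl : i.toNat < row.length
      · simp [show i < (row.length : Int) by omega]
      · rw [List.getD_eq_default _ _ (by omega)]
        simp [show ¬ ((row.length : Int) > i) by omega]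
  constructor
  · intro h k h0 hn
    have := h k (by rw [PySem.List.mem_pyRange_one]; exact ⟨h0, hn⟩)
    rw [(hbody k h0).2] at this
    simp only [beq_iff_eq] at this
    rw [← (hbody k h0).1, this]
    rfl
  · intro h i hmem
    rw [PySem.List.mem_pyRange_one] at hmem
    rw [(hbody i hmem.1).2]
    simp only [beq_iff_eq]
    rw [(hbody i hmem.1).1]
    exact h i hmem.1 hmem.2

-- the counting argument: if every row index balances, no column index ≥ len(reg) holds a True
lemma outFrom_natCast (reg : List (List Bool)) (i : ℕ) :
    outFrom reg 0 (i : Int) = (reg.getD i []).count true := by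
  unfold outFrom
  simp

lemma colHit_natCast (row : List Bool) (i : ℕ) :
    colHit row 0 (i : Int) = row.getD i false := by
  unfold colHit
  simp

lemma sum_getD_range {α : Type} (reg : List α) (d : α) (f : α → ℕ) :
    ∑ i ∈ Finset.range reg.length, f (reg.getD i d) = (reg.map f).sum := by
  induction reg with
  | nil => simp
  | cons r rest ih =>
    rw [List.length_cons, Finset.sum_range_succ']
    simp only [List.getD_cons_succ, List.getD_cons_zero, ih]
    simp [Nat.add_comm]

lemma sum_getD_col (row : List Bool) (n : ℕ) :
    ∑ i ∈ Finset.range n, (if row.getD i false then 1 else 0) = (row.take n).count true := by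
  induction row generalizing n with
  | nil => simp [List.getD]
  | cons c rest ih =>
    cases n with
    | zero => simp
    | succ m =>
      rw [Finset.sum_range_succ']
      simp only [List.getD_cons_succ, List.getD_cons_zero, ih]
      cases c <;> simp [List.count_cons, Nat.add_comm]

lemma sum_countP_col (reg : List (List Bool)) (n : ℕ) :
    ∑ i ∈ Finset.range n, reg.countP (fun row => row.getD i false)
      = (reg.map (fun row => (row.take n).count true)).sum := by
  induction reg with
  | nil => simp
  | cons r rest ih =>
    simp only [List.countP_cons, List.map_cons, List.sum_cons]
    rw [Finset.sum_add_distrib, ih, sum_getD_col]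
    omega

lemma sum_map_eq_forcing {α : Type} (l : List α) (f g : α → ℕ)
    (hle : ∀ x ∈ l, g x ≤ f x) (hsum : (l.map f).sum = (l.map g).sum) :
    ∀ x ∈ l, f x = g x := by
  induction l with
  | nil => simp
  | cons r rest ih =>
    simp only [List.map_cons, List.sum_cons] at hsum
    have h1 : g r ≤ f r := hle r (List.mem_cons_self)
    have h2 : (rest.map g).sum ≤ (rest.map f).sum := by
      apply List.sum_le_sum
      intro x hx
      exact hle x (List.mem_cons_of_mem _ hx)
    intro x hx
    rcases List.mem_cons.mp hx with rfl | hx'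
    · omega
    · exact ih (fun y hy => hle y (List.mem_cons_of_mem _ hy)) (by omega) x hx'

lemma no_tail_true (reg : List (List Bool))
    (h : ∀ k : Int, 0 ≤ k → k < (reg.length : Int) → outFrom reg 0 k = inCnt reg k) :
    ∀ row ∈ reg, (row.drop reg.length).count true = 0 := by
  have hsum : ∑ i ∈ Finset.range reg.length, outFrom reg 0 (i : Int)
      = ∑ i ∈ Finset.range reg.length, inCnt reg (i : Int) := by
    apply Finset.sum_congr rfl
    intro i hi
    exact h i (by positivity) (by simpa using Finset.mem_range.mp hi)
  rw [show (∑ i ∈ Finset.range reg.length, outFrom reg 0 (i : Int))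
        = ∑ i ∈ Finset.range reg.length, (reg.getD i []).count true from
      Finset.sum_congr rfl (fun i _ => outFrom_natCast reg i)] at hsum
  rw [show (∑ i ∈ Finset.range reg.length, inCnt reg (i : Int))
        = ∑ i ∈ Finset.range reg.length, reg.countP (fun row => row.getD i false) from
      Finset.sum_congr rfl (fun i _ => by
        have hfun : (fun row : List Bool => colHit row 0 (i : Int))
            = (fun row : List Bool => row.getD i false) :=
          funext (fun row => colHit_natCast row i)
        simp only [inCnt, hfun])] at hsum
  rw [sum_getD_range, sum_countP_col] at hsum
  have hpt := sum_map_eq_forcing reg (fun row => row.count true)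
      (fun row => (row.take reg.length).count true)
      (fun row _ => (List.take_sublist _ _).count_le _) hsum
  intro row hrow
  have hrt := hpt row hrow
  simp only at hrt
  have hsplit : row.count true
      = (row.take reg.length).count true + (row.drop reg.length).count true := by
    conv_lhs => rw [← List.take_append_drop reg.length row]
    rw [List.count_append]
  omega

lemma drop_zero_getD (l : List Bool) (n j : ℕ) (hz : (l.drop n).count true = 0)
    (hj : n ≤ j) : l.getD j false = false := by
  by_cases hl : j < l.length
  · have hmem : l[j] ∈ l.drop n := by
      have : l[j] = (l.drop n)[j - n]'(by simp; omega) := by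
        rw [List.getElem_drop]
        congr 1
        omega
      rw [this]
      exact List.getElem_mem _
    have hnot : true ∉ l.drop n := List.count_eq_zero.mp hz
    rw [List.getD_eq_getElem _ _ hl]
    cases hb : l[j]
    · rfl
    · exact absurd (hb ▸ hmem) hnot
  · rw [List.getD_eq_default _ _ (by omega)]

lemma main_eq (reg : List (List Bool)) : newRoadSystem reg = newRoadSystem_alt reg := by
  rw [Bool.eq_iff_iff, A_iff, B_iff]
  constructor
  · intro h k h0 hn
    by_cases hz : outFrom reg 0 k ≠ 0 ∨ inCnt reg k ≠ 0
    · exact h k hz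
    · push_neg at hz; rw [hz.1, hz.2]
  · intro h k hz
    have h0 : (0 : Int) ≤ k := by
      rcases hz with hz | hz
      · unfold outFrom at hz
        by_contra h0
        rw [if_neg (by omega)] at hz
        exact hz rfl
      · obtain ⟨row, -, hrow⟩ : ∃ row ∈ reg, colHit row 0 k = true := by
          by_contra hall; push_neg at hall
          exact hz (List.countP_eq_zero.mpr (by simpa using hall))
        unfold colHit at hrow
        simp only [Bool.and_eq_true, decide_eq_true_eq] at hrow
        exact hrow.1
    have hn : k < (reg.length : Int) := by
      rcases hz with hz | hz
      · unfold outFrom at hz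
        rw [if_pos h0] at hz
        have hlt : (k - 0).toNat < reg.length := by
          by_contra hge
          rw [List.getD_eq_default _ _ (by omega)] at hz
          simp at hz
        omega
      · obtain ⟨row, hmem, hrow⟩ : ∃ row ∈ reg, colHit row 0 k = true := by
          by_contra hall; push_neg at hall
          exact hz (List.countP_eq_zero.mpr (by simpa using hall))
        unfold colHit at hrow
        simp only [Bool.and_eq_true, decide_eq_true_eq] at hrow
        by_contra hge
        have hzc := no_tail_true reg h row hmem
        have : row.getD (k - 0).toNat false = false :=
          drop_zero_getD row reg.length _ hzc (by omega)
        rw [this] at hrow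
        exact Bool.false_ne_true hrow.2
    exact h k h0 hn

-- ===== VERDICT (by name: the statement is the Claim_ definition above) =====
theorem newRoadSystem_spec : Claim_equal_newRoadSystem := by
  intro reg _
  unfold Spec_newRoadSystem
  exact main_eq reg
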